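-- pv_equiv track=rewrite | github.com/MoeinKarimii/Mapsa-pre-camp | pre-camp/Exercises/Exercise 1/Max & Min.py | max_or_min
-- ===== SOURCE A (Python) =====
-- def max_or_min(num1, num2, num3):
--     num_list = [num1, num2, num3]
--     max_num = num_list[0]
--     min_num = num_list[0]
--     for i in range(1,3):
--         if num_list[i] > max_num:
--             max_num = num_list[i]
--         elif num_list[i] < min_num:
--             min_num = num_list[i]
--     return [max_num, min_num]
-- ===== SOURCE B (Python) =====
-- def max_or_min(num1, num2, num3):
--     s = sorted([num1, num2, num3])
--     return [s[2], s[0]]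
-- ===== Notes on version B (the rewrite author's own statement) =====
-- stated objective: simpler
-- what changed: Replaces A's manual max/min tracking loop over indices with sorting the three values and returning the two ends of the sorted list.
import Mathlib
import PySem

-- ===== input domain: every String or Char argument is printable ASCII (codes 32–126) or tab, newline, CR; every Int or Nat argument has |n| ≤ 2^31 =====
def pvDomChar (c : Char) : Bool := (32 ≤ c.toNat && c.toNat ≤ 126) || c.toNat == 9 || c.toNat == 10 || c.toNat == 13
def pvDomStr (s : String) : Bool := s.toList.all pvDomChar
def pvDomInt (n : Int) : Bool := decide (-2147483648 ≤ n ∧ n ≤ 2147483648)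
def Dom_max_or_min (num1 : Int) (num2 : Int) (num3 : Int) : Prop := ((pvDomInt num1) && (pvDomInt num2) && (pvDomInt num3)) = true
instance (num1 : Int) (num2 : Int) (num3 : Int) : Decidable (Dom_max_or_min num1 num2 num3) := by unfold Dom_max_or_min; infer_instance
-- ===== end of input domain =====

-- ===== PORT A =====
-- Port of A: list of the three numbers, a max/min tracking loop over range(1,3).
def max_or_min (num1 : Int) (num2 : Int) (num3 : Int) : List Int :=
  let numList : List Int := [num1, num2, num3]
  let st := (PySem.List.pyRange 1 3 1).foldl
    (fun (p : Int × Int) i =>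
      let x := PySem.List.pyGetD numList i 0
      if x > p.1 then (x, p.2)
      else if x < p.2 then (p.1, x)
      else p)
    (PySem.List.pyGetD numList 0 0, PySem.List.pyGetD numList 0 0)
  [st.1, st.2]

-- ===== PORT B =====
-- Port of B: sort the three values, return the last and first elements.
def max_or_min_alt (num1 : Int) (num2 : Int) (num3 : Int) : List Int :=
  let s := PySem.List.sorted [num1, num2, num3] (fun x => x) false
  [PySem.List.pyGetD s 2 0, PySem.List.pyGetD s 0 0]

-- ===== PRECONDITION & SPEC =====
def Spec_max_or_min (num1 : Int) (num2 : Int) (num3 : Int) (out : List Int) : Prop := out = max_or_min_alt num1 num2 num3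
instance (num1 : Int) (num2 : Int) (num3 : Int) (out : List Int) : Decidable (Spec_max_or_min num1 num2 num3 out) := by unfold Spec_max_or_min; infer_instance

-- ===== CLAIM (what is proved, stated in full; the proofs are below) =====
def Claim_equal_max_or_min : Prop := ∀ (num1 : Int) (num2 : Int) (num3 : Int), Dom_max_or_min num1 num2 num3 → Spec_max_or_min num1 num2 num3 (max_or_min num1 num2 num3)

-- ===== LEMMAS AND PROOFS =====

-- the sorted order of the three values, named branch by branch
theorem sorted_three (a b c : Int) :
    PySem.List.sorted [a, b, c] (fun x => x) false =
      if a ≤ b then (if c < a then [c, a, b] else if c < b then [a, c, b] else [a, b, c])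
      else (if c < b then [c, b, a] else if c < a then [b, c, a] else [b, a, c]) := by
  split_ifs with h1 h2 h3 h4 h5 <;>
    apply PySem.List.sorted_id_eq_of_perm_of_pairwise
  · exact (List.Perm.swap a c [b]).trans (List.Perm.cons a (List.Perm.swap b c []))
  · simp; omega
  · exact List.Perm.cons a (List.Perm.swap b c [])
  · simp; omega
  · exact List.Perm.refl _
  · simp; omega
  · exact ((List.Perm.swap b c [a]).trans (List.Perm.cons b (List.Perm.swap a c []))).trans
      (List.Perm.swap a b [c])
  · simp; omega
  · exact (List.Perm.cons b (List.Perm.swap a c [])).trans (List.Perm.swap a b [c])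
  · simp; omega
  · exact List.Perm.swap a b [c]
  · simp; omega

-- ===== VERDICT (by name: the statement is the Claim_ definition above) =====
set_option maxHeartbeats 1000000 in
theorem max_or_min_spec : Claim_equal_max_or_min := by
  intro a b c _
  unfold Spec_max_or_min max_or_min max_or_min_alt
  rw [sorted_three a b c]
  have hr : PySem.List.pyRange 1 3 1 = [1, 2] := by decide
  simp only [hr, List.foldl]
  simp [PySem.List.pyGetD, PySem.List.pyIdx?, PySem.List.pyGet?]
  split_ifs <;> simp_all <;> omega
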